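-- pv_equiv track=rewrite | github.com/hakupao/tools_box | src/utils/xlsx_sheet_splitter.py | _extract_date_tokens
-- ===== SOURCE A (Python) =====
-- from typing import Callable, Dict, Iterable, List, Optional, Sequence, Set
--
-- def _extract_date_tokens(date_part: str) -> Sequence[str]:
--     tokens: List[str] = []
--     i = 0
--     while i < len(date_part):
--         ch = date_part[i]
--         if ch in {"y", "m", "d"}:
--             j = i + 1
--             while j < len(date_part) and date_part[j] == ch:
--                 j += 1
--             tokens.append(date_part[i:j])
--             i = j
--         else:
--             i += 1
--     return tokens
-- ===== SOURCE B (Python) =====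
-- from typing import List, Sequence
--
--
-- def _extract_date_tokens(date_part: str) -> Sequence[str]:
--     # Boundary detection instead of a run scan: a run START is a y/m/d position whose
--     # predecessor differs, a run END (exclusive) is a y/m/d position whose successor
--     # differs; runs are disjoint and ordered, so the k-th start pairs with the k-th end.
--     n = len(date_part)
--     starts = [i for i in range(n)
--               if date_part[i] in "ymd" and (i == 0 or date_part[i - 1] != date_part[i])]
--     ends = [i + 1 for i in range(n)
--             if date_part[i] in "ymd" and (i == n - 1 or date_part[i + 1] != date_part[i])]
--     return [date_part[a:b] for a, b in zip(starts, ends)]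
-- ===== Notes on version B (the rewrite author's own statement) =====
-- stated objective: alternative
-- what changed: Replaces A's single index loop with an inner same-character scan by a staged boundary-detection algorithm: one pass collects run-start indices (y/m/d position whose predecessor differs), one pass collects run-end indices (successor differs), and the slices at zipped (start,end) pairs are the tokens.
import Mathlib
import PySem

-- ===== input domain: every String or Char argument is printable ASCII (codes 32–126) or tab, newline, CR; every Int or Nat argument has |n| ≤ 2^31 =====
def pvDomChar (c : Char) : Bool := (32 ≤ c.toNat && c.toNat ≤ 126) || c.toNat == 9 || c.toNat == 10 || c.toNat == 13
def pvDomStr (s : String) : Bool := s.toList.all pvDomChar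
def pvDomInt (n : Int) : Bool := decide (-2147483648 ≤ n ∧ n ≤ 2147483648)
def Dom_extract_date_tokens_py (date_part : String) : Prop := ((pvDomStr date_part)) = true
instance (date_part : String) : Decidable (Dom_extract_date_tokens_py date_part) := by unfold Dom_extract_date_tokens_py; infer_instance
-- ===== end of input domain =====

-- B replaces A's index loop with inner same-character run scan by staged boundary detection:
-- collect run-start indices, collect run-end indices, zip them and slice (alternative).

-- ===== PORT A =====
-- inner `while j < len(date_part) and date_part[j] == ch: j += 1`
def pyAInner (cs : List Char) (ch : Char) (j : Nat) : Nat :=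
  if h : j < cs.length then
    if cs[j] = ch then pyAInner cs ch (j + 1) else j
  else j
termination_by cs.length - j

-- j ≤ result of the inner scan (needed for termination of the outer loop)
theorem pyAInner_ge (cs : List Char) (ch : Char) (j : Nat) : j ≤ pyAInner cs ch j := by
  unfold pyAInner
  split
  · split
    · exact le_trans (Nat.le_succ j) (pyAInner_ge cs ch (j + 1))
    · exact le_refl j
  · exact le_refl j
termination_by cs.length - j

-- outer `while i < len(date_part)` loop with the `tokens` accumulator;
-- the slice date_part[i:j] (0 ≤ i ≤ j) is exactly (drop i).take (j - i)
def pyALoop (cs : List Char) (i : Nat) (tokens : List String) : List String :=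
  if h : i < cs.length then
    let ch := cs[i]
    if ch = 'y' ∨ ch = 'm' ∨ ch = 'd' then
      pyALoop cs (pyAInner cs ch (i + 1))
        (tokens ++ [String.ofList ((cs.drop i).take (pyAInner cs ch (i + 1) - i))])
    else
      pyALoop cs (i + 1) tokens
  else tokens
termination_by cs.length - i
decreasing_by
  · have := pyAInner_ge cs cs[i] (i + 1); omega
  · omega

def extract_date_tokens_py (date_part : String) : List String :=
  pyALoop date_part.toList 0 []

-- ===== PORT B =====
-- `ch in "ymd"`
def pyIsYmd (c : Char) : Bool := c == 'y' || c == 'm' || c == 'd'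

-- starts = [i for i in range(n) if date_part[i] in "ymd" and (i == 0 or date_part[i-1] != date_part[i])]
-- (every index used is in range, so getD with a dummy default is exact)
def pyBStarts (cs : List Char) : List Nat :=
  (List.range cs.length).filter
    (fun i => pyIsYmd (cs.getD i ' ') && (i == 0 || cs.getD (i - 1) ' ' != cs.getD i ' '))

-- ends = [i + 1 for i in range(n) if date_part[i] in "ymd" and (i == n-1 or date_part[i+1] != date_part[i])]
def pyBEnds (cs : List Char) : List Nat :=
  ((List.range cs.length).filter
    (fun i => pyIsYmd (cs.getD i ' ') &&
      (i == cs.length - 1 || cs.getD (i + 1) ' ' != cs.getD i ' '))).map (fun i => i + 1)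

-- [date_part[a:b] for a, b in zip(starts, ends)]; 0 ≤ a ≤ b ≤ n, so the slice is (drop a).take (b - a)
def extract_date_tokens_py_alt (date_part : String) : List String :=
  let cs := date_part.toList
  ((pyBStarts cs).zip (pyBEnds cs)).map
    (fun ab => String.ofList ((cs.drop ab.1).take (ab.2 - ab.1)))

-- ===== PRECONDITION & SPEC =====
def Spec_extract_date_tokens_py (date_part : String) (out : List String) : Prop := out = extract_date_tokens_py_alt date_part
instance (date_part : String) (out : List String) : Decidable (Spec_extract_date_tokens_py date_part out) := by unfold Spec_extract_date_tokens_py; infer_instance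

-- ===== CLAIM (what is proved, stated in full; the proofs are below) =====
def Claim_equal_extract_date_tokens_py : Prop := ∀ (date_part : String), Dom_extract_date_tokens_py date_part → Spec_extract_date_tokens_py date_part (extract_date_tokens_py date_part)

-- ===== LEMMAS AND PROOFS =====

-- common intermediate form: the list of joined y/m/d runs
def ymdRuns (cs : List Char) : List String :=
  match cs with
  | [] => []
  | c :: rest =>
      if c = 'y' ∨ c = 'm' ∨ c = 'd' then
        String.ofList (c :: rest.takeWhile (· == c)) :: ymdRuns (rest.dropWhile (· == c))
      else ymdRuns rest
termination_by cs.length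
decreasing_by
  · have := List.length_dropWhile_le (· == c) rest
    simp only [List.length_cons]; omega
  · simp

theorem take_length_takeWhile (p : Char → Bool) (l : List Char) :
    l.take (l.takeWhile p).length = l.takeWhile p := by
  induction l with
  | nil => simp
  | cons h t ih =>
    by_cases hp : p h
    · simp [hp, ih]
    · simp [hp]

theorem drop_length_takeWhile (p : Char → Bool) (l : List Char) :
    l.drop (l.takeWhile p).length = l.dropWhile p := by
  induction l with
  | nil => simp
  | cons h t ih =>
    by_cases hp : p h
    · simp [hp, ih]
    · simp [hp]

theorem pyAInner_eq (cs : List Char) (ch : Char) (j : Nat) :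
    pyAInner cs ch j = j + ((cs.drop j).takeWhile (· == ch)).length := by
  unfold pyAInner
  split
  · rename_i h
    have hd : cs.drop j = cs[j] :: cs.drop (j + 1) := List.drop_eq_getElem_cons h
    by_cases he : cs[j] = ch
    · rw [if_pos he, pyAInner_eq cs ch (j + 1), hd]
      simp [he]
      omega
    · rw [if_neg he, hd]
      simp [he]
  · rename_i h
    rw [List.drop_eq_nil_of_le (by omega)]
    simp
termination_by cs.length - j

theorem pyALoop_eq (cs : List Char) (i : Nat) (tokens : List String) :
    pyALoop cs i tokens = tokens ++ ymdRuns (cs.drop i) := by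
  unfold pyALoop
  split
  · rename_i h
    have hd : cs.drop i = cs[i] :: cs.drop (i + 1) := List.drop_eq_getElem_cons h
    set ch := cs[i] with hch
    by_cases hy : ch = 'y' ∨ ch = 'm' ∨ ch = 'd'
    · rw [if_pos hy]
      have hin := pyAInner_eq cs ch (i + 1)
      set L := ((cs.drop (i + 1)).takeWhile (· == ch)).length with hL
      have hj : pyAInner cs ch (i + 1) = i + 1 + L := hin
      have hslice : (cs.drop i).take (pyAInner cs ch (i + 1) - i)
          = ch :: (cs.drop (i + 1)).takeWhile (· == ch) := by
        rw [hj, hd]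
        have : i + 1 + L - i = L + 1 := by omega
        rw [this, List.take_succ_cons, hL, take_length_takeWhile]
      have hrest : cs.drop (pyAInner cs ch (i + 1))
          = (cs.drop (i + 1)).dropWhile (· == ch) := by
        rw [hj, ← drop_length_takeWhile (· == ch) (cs.drop (i + 1)), ← hL]
        rw [List.drop_drop]
      rw [pyALoop_eq cs (pyAInner cs ch (i + 1)), hslice, hrest, hd]
      rw [ymdRuns, if_pos hy]
      simp
    · rw [if_neg hy, pyALoop_eq cs (i + 1), hd, ymdRuns, if_neg hy]
  · rename_i h
    rw [List.drop_eq_nil_of_le (by omega)]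
    simp [ymdRuns]
termination_by cs.length - i
decreasing_by
  · have := pyAInner_ge cs cs[i] (i + 1); omega
  · omega


-- filter over a split range
theorem filter_range_add (p : Nat → Bool) (m k : Nat) :
    (List.range (m + k)).filter p
      = (List.range m).filter p
        ++ ((List.range k).filter (fun i => p (m + i))).map (fun i => m + i) := by
  rw [List.range_add, List.filter_append, List.filter_map]
  rfl

theorem filter_range_nil (p : Nat → Bool) (k : Nat) (h : ∀ i < k, p i = false) :
    (List.range k).filter p = [] := by
  rw [List.filter_eq_nil_iff]
  intro a ha
  simp [h a (List.mem_range.mp ha)]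

theorem filter_range_succ_zero (p : Nat → Bool) (k : Nat) (h0 : p 0 = true)
    (h : ∀ i < k, p (i + 1) = false) : (List.range (k + 1)).filter p = [0] := by
  rw [List.range_succ_eq_map, List.filter_cons_of_pos h0, List.filter_map]
  have : (List.range k).filter (p ∘ Nat.succ) = [] :=
    filter_range_nil _ _ (fun i hi => h i hi)
  rw [this]
  rfl

theorem filter_range_succ_last (p : Nat → Bool) (k : Nat) (h : ∀ i < k, p i = false)
    (hk : p k = true) : (List.range (k + 1)).filter p = [k] := by
  rw [List.range_succ, List.filter_append, filter_range_nil p k h]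
  simp [hk]

-- getD facts for a leading run c :: (r ++ t) with every element of r equal to c
theorem getD_run (c : Char) (r t : List Char) (hr : ∀ x ∈ r, x = c) :
    ∀ i ≤ r.length, (c :: (r ++ t)).getD i ' ' = c := by
  intro i hi
  match i with
  | 0 => rfl
  | Nat.succ i' =>
    rw [List.getD_cons_succ]
    have hlt : i' < r.length := by omega
    rw [List.getD_append _ _ _ _ hlt, List.getD_eq_getElem _ _ hlt]
    exact hr _ (r.getElem_mem hlt)

theorem getD_tail (c : Char) (r t : List Char) :
    ∀ i, (c :: (r ++ t)).getD (r.length + 1 + i) ' ' = t.getD i ' ' := by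
  intro i
  have hidx : r.length + 1 + i = (r.length + i) + 1 := by omega
  rw [hidx, List.getD_cons_succ, List.getD_append_right _ _ _ _ (by omega)]
  congr 1
  omega

theorem starts_run (c : Char) (r t : List Char) (hc : pyIsYmd c = true)
    (hr : ∀ x ∈ r, x = c) (ht : ∀ x ∈ t.head?, x ≠ c) :
    pyBStarts (c :: (r ++ t)) = 0 :: (pyBStarts t).map (fun i => r.length + 1 + i) := by
  unfold pyBStarts
  have hn : (c :: (r ++ t)).length = (r.length + 1) + t.length := by
    simp [List.length_cons, List.length_append]; omega
  rw [hn, filter_range_add]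
  have h1 : ∀ i < r.length,
      (pyIsYmd ((c :: (r ++ t)).getD (i + 1) ' ') &&
        ((i + 1 : Nat) == 0 || (c :: (r ++ t)).getD (i + 1 - 1) ' ' != (c :: (r ++ t)).getD (i + 1) ' ')) = false := by
    intro i hi
    have e1 : (c :: (r ++ t)).getD (i + 1) ' ' = c := getD_run c r t hr _ (by omega)
    have e2 : (c :: (r ++ t)).getD (i + 1 - 1) ' ' = c := by
      have hidx : i + 1 - 1 = i := by omega
      rw [hidx]; exact getD_run c r t hr i (by omega)
    rw [e1, e2]
    simp
  rw [filter_range_succ_zero _ _ (by simp [hc]) h1]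
  have h2 : (List.range t.length).filter
        (fun i => pyIsYmd ((c :: (r ++ t)).getD (r.length + 1 + i) ' ') &&
          ((r.length + 1 + i : Nat) == 0 ||
            (c :: (r ++ t)).getD (r.length + 1 + i - 1) ' ' != (c :: (r ++ t)).getD (r.length + 1 + i) ' '))
      = (List.range t.length).filter
        (fun i => pyIsYmd (t.getD i ' ') && ((i : Nat) == 0 || t.getD (i - 1) ' ' != t.getD i ' ')) := by
    apply List.filter_congr
    intro i hi
    rw [List.mem_range] at hi
    match i with
    | 0 =>
      match t, hi with
      | x :: t', _ =>
        have e2 : (c :: (r ++ x :: t')).getD (r.length + 1 + 0 - 1) ' ' = c := by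
          have hidx : r.length + 1 + 0 - 1 = r.length := by omega
          rw [hidx]; exact getD_run c r (x :: t') hr r.length (le_refl _)
        have e1 : (c :: (r ++ x :: t')).getD (r.length + 1 + 0) ' ' = x := by
          have h0 : ((x :: t') : List Char).getD 0 ' ' = x := rfl
          rw [getD_tail c r (x :: t') 0, h0]
        have hx : x ≠ c := ht x (by simp)
        rw [e1, e2]
        simp [bne_iff_ne, Ne.symm hx]
    | Nat.succ i' =>
      have e1 : (c :: (r ++ t)).getD (r.length + 1 + (i' + 1)) ' ' = t.getD (i' + 1) ' ' :=
        getD_tail c r t (i' + 1)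
      have e2 : (c :: (r ++ t)).getD (r.length + 1 + (i' + 1) - 1) ' ' = t.getD i' ' ' := by
        have hidx : r.length + 1 + (i' + 1) - 1 = r.length + 1 + i' := by omega
        rw [hidx]; exact getD_tail c r t i'
      rw [e1, e2]
      have hz : ((r.length + 1 + (i' + 1) : Nat) == 0) = false := beq_eq_false_iff_ne.mpr (by omega)
      rw [hz]
      simp
  rw [h2]
  rfl

theorem ends_run (c : Char) (r t : List Char) (hc : pyIsYmd c = true)
    (hr : ∀ x ∈ r, x = c) (ht : ∀ x ∈ t.head?, x ≠ c) :
    pyBEnds (c :: (r ++ t)) = (r.length + 1) :: (pyBEnds t).map (fun i => r.length + 1 + i) := by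
  unfold pyBEnds
  have hn : (c :: (r ++ t)).length = (r.length + 1) + t.length := by
    simp [List.length_cons, List.length_append]; omega
  rw [hn, filter_range_add]
  have h1 : ∀ i < r.length,
      (pyIsYmd ((c :: (r ++ t)).getD i ' ') &&
        ((i : Nat) == r.length + 1 + t.length - 1 ||
          (c :: (r ++ t)).getD (i + 1) ' ' != (c :: (r ++ t)).getD i ' ')) = false := by
    intro i hi
    have e1 : (c :: (r ++ t)).getD i ' ' = c := getD_run c r t hr i (by omega)
    have e2 : (c :: (r ++ t)).getD (i + 1) ' ' = c := getD_run c r t hr _ (by omega)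
    have hz : ((i : Nat) == r.length + 1 + t.length - 1) = false :=
      beq_eq_false_iff_ne.mpr (by omega)
    rw [e1, e2, hz]
    simp
  have hlast :
      (pyIsYmd ((c :: (r ++ t)).getD r.length ' ') &&
        ((r.length : Nat) == r.length + 1 + t.length - 1 ||
          (c :: (r ++ t)).getD (r.length + 1) ' ' != (c :: (r ++ t)).getD r.length ' ')) = true := by
    have e1 : (c :: (r ++ t)).getD r.length ' ' = c := getD_run c r t hr _ (le_refl _)
    rw [e1, hc]
    match t with
    | [] =>
      have hz : ((r.length : Nat) == r.length + 1 + ([] : List Char).length - 1) = true :=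
        beq_iff_eq.mpr (by simp)
      rw [hz]
      rfl
    | x :: t' =>
      have e2 : (c :: (r ++ x :: t')).getD (r.length + 1) ' ' = x := by
        have h0 : ((x :: t') : List Char).getD 0 ' ' = x := rfl
        have hidx : r.length + 1 = r.length + 1 + 0 := by omega
        rw [hidx, getD_tail c r (x :: t') 0, h0]
      have hx : x ≠ c := ht x (by simp)
      rw [e2]
      simp [bne_iff_ne, hx]
  rw [filter_range_succ_last _ _ h1 hlast]
  have h2 : (List.range t.length).filter
        (fun i => pyIsYmd ((c :: (r ++ t)).getD (r.length + 1 + i) ' ') &&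
          ((r.length + 1 + i : Nat) == r.length + 1 + t.length - 1 ||
            (c :: (r ++ t)).getD (r.length + 1 + i + 1) ' ' != (c :: (r ++ t)).getD (r.length + 1 + i) ' '))
      = (List.range t.length).filter
        (fun i => pyIsYmd (t.getD i ' ') &&
          ((i : Nat) == t.length - 1 || t.getD (i + 1) ' ' != t.getD i ' ')) := by
    apply List.filter_congr
    intro i hi
    rw [List.mem_range] at hi
    have e1 : (c :: (r ++ t)).getD (r.length + 1 + i) ' ' = t.getD i ' ' := getD_tail c r t i
    have e2 : (c :: (r ++ t)).getD (r.length + 1 + i + 1) ' ' = t.getD (i + 1) ' ' := by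
      have hidx : r.length + 1 + i + 1 = r.length + 1 + (i + 1) := by omega
      rw [hidx]; exact getD_tail c r t (i + 1)
    rw [e1, e2]
    by_cases hcase : i = t.length - 1
    · have b1 : ((r.length + 1 + i : Nat) == r.length + 1 + t.length - 1) = true :=
        beq_iff_eq.mpr (by omega)
      have b2 : ((i : Nat) == t.length - 1) = true := beq_iff_eq.mpr (by omega)
      rw [b1, b2]
    · have b1 : ((r.length + 1 + i : Nat) == r.length + 1 + t.length - 1) = false :=
        beq_eq_false_iff_ne.mpr (by omega)
      have b2 : ((i : Nat) == t.length - 1) = false := beq_eq_false_iff_ne.mpr (by omega)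
      rw [b1, b2]
  rw [h2]
  simp [List.map_map]
  intros
  omega

theorem starts_skip (c : Char) (rest : List Char) (hc : pyIsYmd c = false) :
    pyBStarts (c :: rest) = (pyBStarts rest).map (fun i => 1 + i) := by
  unfold pyBStarts
  have hn : (c :: rest).length = 1 + rest.length := by simp [List.length_cons]; omega
  rw [hn, filter_range_add]
  have h1 : (List.range 1).filter
      (fun i => pyIsYmd ((c :: rest).getD i ' ') &&
        ((i : Nat) == 0 || (c :: rest).getD (i - 1) ' ' != (c :: rest).getD i ' ')) = [] := by
    apply filter_range_nil
    intro i hi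
    interval_cases i
    simp [hc]
  rw [h1]
  have h2 : (List.range rest.length).filter
        (fun i => pyIsYmd ((c :: rest).getD (1 + i) ' ') &&
          ((1 + i : Nat) == 0 || (c :: rest).getD (1 + i - 1) ' ' != (c :: rest).getD (1 + i) ' '))
      = (List.range rest.length).filter
        (fun i => pyIsYmd (rest.getD i ' ') && ((i : Nat) == 0 || rest.getD (i - 1) ' ' != rest.getD i ' ')) := by
    apply List.filter_congr
    intro i hi
    rw [List.mem_range] at hi
    have e1 : (c :: rest).getD (1 + i) ' ' = rest.getD i ' ' := by
      have hidx : 1 + i = i + 1 := by omega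
      rw [hidx, List.getD_cons_succ]
    match i with
    | 0 =>
      have e2 : (c :: rest).getD (1 + 0 - 1) ' ' = c := rfl
      rw [e1, e2]
      cases hx : pyIsYmd (rest.getD 0 ' ') with
      | false => simp
      | true =>
        have hne : ¬ c = rest[0]?.getD ' ' := by
          intro h
          have hgd : rest.getD 0 ' ' = rest[0]?.getD ' ' := List.getD_eq_getElem?_getD
          rw [← hgd] at h
          rw [← h, hc] at hx
          exact Bool.false_ne_true hx
        simp [bne_iff_ne, hne]
    | Nat.succ i' =>
      have e2 : (c :: rest).getD (1 + (i' + 1) - 1) ' ' = rest.getD i' ' ' := by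
        have hidx : 1 + (i' + 1) - 1 = i' + 1 := by omega
        rw [hidx, List.getD_cons_succ]
      rw [e1, e2]
      have hz : ((1 + (i' + 1) : Nat) == 0) = false := beq_eq_false_iff_ne.mpr (by omega)
      rw [hz]
      simp
  rw [h2]
  rfl

theorem ends_skip (c : Char) (rest : List Char) (hc : pyIsYmd c = false) :
    pyBEnds (c :: rest) = (pyBEnds rest).map (fun i => 1 + i) := by
  unfold pyBEnds
  have hn : (c :: rest).length = 1 + rest.length := by simp [List.length_cons]; omega
  rw [hn, filter_range_add]
  have h1 : (List.range 1).filter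
      (fun i => pyIsYmd ((c :: rest).getD i ' ') &&
        ((i : Nat) == 1 + rest.length - 1 ||
          (c :: rest).getD (i + 1) ' ' != (c :: rest).getD i ' ')) = [] := by
    apply filter_range_nil
    intro i hi
    interval_cases i
    simp [hc]
  rw [h1]
  have h2 : (List.range rest.length).filter
        (fun i => pyIsYmd ((c :: rest).getD (1 + i) ' ') &&
          ((1 + i : Nat) == 1 + rest.length - 1 ||
            (c :: rest).getD (1 + i + 1) ' ' != (c :: rest).getD (1 + i) ' '))
      = (List.range rest.length).filter
        (fun i => pyIsYmd (rest.getD i ' ') &&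
          ((i : Nat) == rest.length - 1 || rest.getD (i + 1) ' ' != rest.getD i ' ')) := by
    apply List.filter_congr
    intro i hi
    rw [List.mem_range] at hi
    have e1 : (c :: rest).getD (1 + i) ' ' = rest.getD i ' ' := by
      have hidx : 1 + i = i + 1 := by omega
      rw [hidx, List.getD_cons_succ]
    have e2 : (c :: rest).getD (1 + i + 1) ' ' = rest.getD (i + 1) ' ' := by
      have hidx : 1 + i + 1 = (i + 1) + 1 := by omega
      rw [hidx, List.getD_cons_succ]
    rw [e1, e2]
    by_cases hcase : i = rest.length - 1
    · have b1 : ((1 + i : Nat) == 1 + rest.length - 1) = true := beq_iff_eq.mpr (by omega)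
      have b2 : ((i : Nat) == rest.length - 1) = true := beq_iff_eq.mpr (by omega)
      rw [b1, b2]
    · have b1 : ((1 + i : Nat) == 1 + rest.length - 1) = false := beq_eq_false_iff_ne.mpr (by omega)
      have b2 : ((i : Nat) == rest.length - 1) = false := beq_eq_false_iff_ne.mpr (by omega)
      rw [b1, b2]
  rw [h2]
  simp [List.map_map]
  intros
  omega

theorem pyIsYmd_iff (c : Char) : pyIsYmd c = true ↔ (c = 'y' ∨ c = 'm' ∨ c = 'd') := by
  simp [pyIsYmd, or_assoc]

theorem drop_run_aux (r t : List Char) (a : Nat) : (r ++ t).drop (r.length + a) = t.drop a := by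
  simp

-- B's staged boundary passes produce exactly the y/m/d runs
theorem bTokens_eq (cs : List Char) :
    ((pyBStarts cs).zip (pyBEnds cs)).map
      (fun ab => String.ofList ((cs.drop ab.1).take (ab.2 - ab.1))) = ymdRuns cs := by
  match cs with
  | [] => simp [pyBStarts, pyBEnds, ymdRuns]
  | c :: rest =>
    by_cases hy : c = 'y' ∨ c = 'm' ∨ c = 'd'
    · have hc : pyIsYmd c = true := (pyIsYmd_iff c).mpr hy
      have hr : ∀ x ∈ rest.takeWhile (· == c), x = c := by
        intro x hx
        simpa using List.mem_takeWhile_imp hx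
      have ht : ∀ x ∈ (rest.dropWhile (· == c)).head?, x ≠ c := by
        intro x hx hxc
        have h := List.head?_dropWhile_not (· == c) rest
        rw [hx] at h
        simp only at h
        rw [hxc] at h
        simp at h
      have hcs : (c :: rest) = c :: (rest.takeWhile (· == c) ++ rest.dropWhile (· == c)) := by
        rw [List.takeWhile_append_dropWhile]
      rw [hcs, starts_run c _ _ hc hr ht, ends_run c _ _ hc hr ht,
        List.zip_cons_cons, List.zip_map, List.map_cons, List.map_map]
      have hhead : ((c :: (rest.takeWhile (· == c) ++ rest.dropWhile (· == c))).drop 0).take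
            ((rest.takeWhile (· == c)).length + 1 - 0) = c :: rest.takeWhile (· == c) := by
        rw [List.drop_zero]
        have : (rest.takeWhile (· == c)).length + 1 - 0 = (rest.takeWhile (· == c)).length + 1 := by omega
        rw [this, List.take_succ_cons, List.take_left' rfl]
      rw [hhead]
      have htail : ((pyBStarts (rest.dropWhile (· == c))).zip (pyBEnds (rest.dropWhile (· == c)))).map
            ((fun ab => String.ofList (((c :: (rest.takeWhile (· == c) ++ rest.dropWhile (· == c))).drop ab.1).take (ab.2 - ab.1))) ∘
              Prod.map (fun i => (rest.takeWhile (· == c)).length + 1 + i) (fun i => (rest.takeWhile (· == c)).length + 1 + i))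
          = ((pyBStarts (rest.dropWhile (· == c))).zip (pyBEnds (rest.dropWhile (· == c)))).map
            (fun ab => String.ofList (((rest.dropWhile (· == c)).drop ab.1).take (ab.2 - ab.1))) := by
        apply List.map_congr_left
        intro ab _
        simp only [Function.comp, Prod.map]
        have hdrop : (c :: (rest.takeWhile (· == c) ++ rest.dropWhile (· == c))).drop
              ((rest.takeWhile (· == c)).length + 1 + ab.1) = (rest.dropWhile (· == c)).drop ab.1 := by
          have hidx : (rest.takeWhile (· == c)).length + 1 + ab.1
              = ((rest.takeWhile (· == c)).length + ab.1) + 1 := by omega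
          rw [hidx, List.drop_succ_cons]
          exact drop_run_aux _ _ _
        have harith : (rest.takeWhile (· == c)).length + 1 + ab.2
            - ((rest.takeWhile (· == c)).length + 1 + ab.1) = ab.2 - ab.1 := by omega
        rw [hdrop, harith]
      rw [htail, bTokens_eq (rest.dropWhile (· == c))]
      conv_rhs => rw [← hcs]
      rw [ymdRuns, if_pos hy]
    · have hc : pyIsYmd c = false := by
        cases h : pyIsYmd c
        · rfl
        · exact absurd ((pyIsYmd_iff c).mp h) hy
      rw [starts_skip c rest hc, ends_skip c rest hc, List.zip_map, List.map_map]
      have htail : ((pyBStarts rest).zip (pyBEnds rest)).map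
            ((fun ab => String.ofList (((c :: rest).drop ab.1).take (ab.2 - ab.1))) ∘
              Prod.map (fun i => 1 + i) (fun i => 1 + i))
          = ((pyBStarts rest).zip (pyBEnds rest)).map
            (fun ab => String.ofList ((rest.drop ab.1).take (ab.2 - ab.1))) := by
        apply List.map_congr_left
        intro ab _
        simp only [Function.comp, Prod.map]
        have hdrop : (c :: rest).drop (1 + ab.1) = rest.drop ab.1 := by
          have hidx : 1 + ab.1 = ab.1 + 1 := by omega
          rw [hidx, List.drop_succ_cons]
        have harith : 1 + ab.2 - (1 + ab.1) = ab.2 - ab.1 := by omega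
        rw [hdrop, harith]
      rw [htail, bTokens_eq rest, ymdRuns, if_neg hy]
termination_by cs.length
decreasing_by
  · have := List.length_dropWhile_le (· == c) rest
    simp only [List.length_cons]; omega
  · simp

-- ===== VERDICT (by name: the statement is the Claim_ definition above) =====
theorem extract_date_tokens_py_spec : Claim_equal_extract_date_tokens_py := by
  intro s _
  unfold Spec_extract_date_tokens_py extract_date_tokens_py extract_date_tokens_py_alt
  rw [pyALoop_eq, List.drop_zero, List.nil_append, bTokens_eq]
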